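-- pv_equiv track=rewrite | github.com/sushantkapse/python | Lucky_Number.py | word_number
-- ===== SOURCE A (Python) =====
-- dict1 = {1 : ['A','J','S'],
--          2 : ['B','K','T'],
--          3 : ['C','L','U'],
--          4 : ['D','M','V'],
--          5:  ['E','N','W'],
--          6 : ['F','O','X'],
--          7 : ['G','P','Y'],
--          8 : ['H','Q','Z'],
--          9 : ['I','R'],
--          }
--
-- def sum_of_digit(number):
--     sum = 0
--     while number > 0:
--
--
--         rem = number % 10
--         sum += rem
--         number = number // 10
--
--     return sum
--
-- def word_number(a):
--     sum = 0
--     for i in a: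
--         for k , v in dict1.items():
--             if i.upper() in v:
--                 sum += k
--
--     if sum > 9:
--         sum = sum_of_digit(sum)
--     return sum
-- ===== SOURCE B (Python) =====
-- def digit_sum(n):
--     return 0 if n <= 0 else n % 10 + digit_sum(n // 10)
--
-- def word_number(a):
--     total = 0
--     for c in a:
--         u = c.upper()
--         if len(u) == 1 and 'A' <= u <= 'Z':
--             total += (ord(u) - 65) % 9 + 1
--     if total > 9:
--         total = digit_sum(total)
--     return total
-- ===== Notes on version B (the rewrite author's own statement) =====
-- stated objective: faster
-- what changed: B replaces A's inner scan over the digit-to-letters dict by the closed-form (ord(upper(c))-65)%9+1 guarded to single A-Z characters, and A's while-loop digit sum by a short recursive digit_sum.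
import Mathlib
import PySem

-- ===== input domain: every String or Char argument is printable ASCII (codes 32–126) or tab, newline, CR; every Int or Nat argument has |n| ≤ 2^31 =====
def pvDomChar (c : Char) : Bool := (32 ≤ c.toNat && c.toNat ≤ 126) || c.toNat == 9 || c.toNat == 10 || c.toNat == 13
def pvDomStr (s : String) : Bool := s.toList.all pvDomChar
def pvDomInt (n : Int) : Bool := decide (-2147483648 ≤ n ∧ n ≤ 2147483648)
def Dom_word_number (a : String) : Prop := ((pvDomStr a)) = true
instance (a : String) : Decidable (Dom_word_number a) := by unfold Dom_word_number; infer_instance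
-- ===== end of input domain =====

-- B replaces A's per-character scan of the digit→letters table by the closed form
-- (ord(upper(c)) - 65) % 9 + 1 guarded to single A–Z characters (objective: idiomatic/faster constant).

-- ===== PORT A =====
def dict1 : List (Int × List String) :=
  [(1, ["A","J","S"]), (2, ["B","K","T"]), (3, ["C","L","U"]), (4, ["D","M","V"]),
   (5, ["E","N","W"]), (6, ["F","O","X"]), (7, ["G","P","Y"]), (8, ["H","Q","Z"]),
   (9, ["I","R"])]

-- while number > 0: sum += number % 10; number //= 10
def sum_of_digit_loop (number sum : Int) : Int :=
  if number > 0 then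
    sum_of_digit_loop (PySem.Int.floordiv number 10) (sum + PySem.Int.mod number 10)
  else sum
termination_by number.toNat
decreasing_by
  have h : PySem.Int.floordiv number 10 = number / 10 :=
    PySem.Int.floordiv_eq_ediv_of_pos (by omega)
  rw [h]; omega

def sum_of_digit (number : Int) : Int := sum_of_digit_loop number 0

def word_number (a : String) : Int :=
  let sum := a.toList.foldl (fun sum i =>
    dict1.foldl (fun sum kv =>
      if PySem.Str.upper (String.mk [i]) ∈ kv.2 then sum + kv.1 else sum) sum) 0
  if sum > 9 then sum_of_digit sum else sum

-- ===== PORT B =====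
def digit_sum (n : Int) : Int :=
  if n ≤ 0 then 0 else PySem.Int.mod n 10 + digit_sum (PySem.Int.floordiv n 10)
termination_by n.toNat
decreasing_by
  have h : PySem.Int.floordiv n 10 = n / 10 :=
    PySem.Int.floordiv_eq_ediv_of_pos (by omega)
  rw [h]; omega

-- c.upper() on a single char is PySem.Chars.upperChar; the `len(u) == 1` guard of Source B
-- is automatically true at type Char, so only the A–Z range test remains.
def word_number_alt (a : String) : Int :=
  let total := a.toList.foldl (fun t c =>
    let u := PySem.Chars.upperChar c
    if 'A' ≤ u ∧ u ≤ 'Z' then t + (PySem.Int.mod ((u.toNat : Int) - 65) 9 + 1) else t) 0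
  if total > 9 then digit_sum total else total

-- ===== PRECONDITION & SPEC =====
def Spec_word_number (a : String) (out : Int) : Prop := out = word_number_alt a
instance (a : String) (out : Int) : Decidable (Spec_word_number a out) := by unfold Spec_word_number; infer_instance

-- ===== CLAIM (what is proved, stated in full; the proofs are below) =====
def Claim_equal_word_number : Prop := ∀ (a : String), Dom_word_number a → Spec_word_number a (word_number a)

-- ===== LEMMAS AND PROOFS =====

def stepA (sum : Int) (i : Char) : Int :=
  dict1.foldl (fun sum kv =>
    if PySem.Str.upper (String.mk [i]) ∈ kv.2 then sum + kv.1 else sum) sum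

def stepB (t : Int) (c : Char) : Int :=
  let u := PySem.Chars.upperChar c
  if 'A' ≤ u ∧ u ≤ 'Z' then t + (PySem.Int.mod ((u.toNat : Int) - 65) 9 + 1) else t

theorem foldl_shift (p : Int × List String → Prop) [DecidablePred p]
    (l : List (Int × List String)) (s : Int) :
    l.foldl (fun s kv => if p kv then s + kv.1 else s) s
      = s + l.foldl (fun s kv => if p kv then s + kv.1 else s) 0 := by
  induction l generalizing s with
  | nil => simp
  | cons kv l ih =>
    simp only [List.foldl]
    rw [ih, ih (if p kv then 0 + kv.1 else 0)]
    split_ifs <;> ring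

set_option maxRecDepth 4000 in
set_option maxHeartbeats 2000000 in
theorem step_eq_of_lt (n : Nat) (hn : n < 127) (s : Int) :
    stepA s (Char.ofNat n) = stepB s (Char.ofNat n) := by
  have : ∀ m ∈ List.range 127, stepA 0 (Char.ofNat m) = stepB 0 (Char.ofNat m) := by decide
  have h0 := this n (List.mem_range.mpr hn)
  have hA : stepA s (Char.ofNat n) = s + stepA 0 (Char.ofNat n) :=
    foldl_shift (fun kv => PySem.Str.upper (String.mk [Char.ofNat n]) ∈ kv.2) dict1 s
  have hB : stepB s (Char.ofNat n) = s + stepB 0 (Char.ofNat n) := by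
    simp only [stepB]; split_ifs <;> ring
  rw [hA, hB, h0]

theorem step_eq (c : Char) (hc : pvDomChar c = true) (s : Int) :
    stepA s c = stepB s c := by
  have hlt : c.toNat < 127 := by
    simp only [pvDomChar, Bool.or_eq_true, Bool.and_eq_true, decide_eq_true_eq,
      beq_iff_eq] at hc
    omega
  have := step_eq_of_lt c.toNat hlt s
  rwa [Char.ofNat_toNat] at this

theorem foldl_step_eq (l : List Char) (hl : ∀ c ∈ l, pvDomChar c = true) (s : Int) :
    l.foldl stepA s = l.foldl stepB s := by
  induction l generalizing s with
  | nil => rfl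
  | cons c l ih =>
    simp only [List.foldl]
    rw [step_eq c (hl c (by simp)) s]
    exact ih (fun x hx => hl x (by simp [hx])) _

theorem sum_loop_eq_digit_sum (n : Int) (s : Int) :
    sum_of_digit_loop n s = s + digit_sum n := by
  by_cases h : n > 0
  · rw [sum_of_digit_loop, digit_sum, if_pos h, if_neg (by omega)]
    have hfd : PySem.Int.floordiv n 10 = n / 10 :=
      PySem.Int.floordiv_eq_ediv_of_pos (by omega)
    have : (PySem.Int.floordiv n 10).toNat < n.toNat := by rw [hfd]; omega
    rw [sum_loop_eq_digit_sum (PySem.Int.floordiv n 10)]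
    ring
  · rw [sum_of_digit_loop, digit_sum, if_neg h, if_pos (by omega)]
    ring
termination_by n.toNat
decreasing_by
  have hfd : PySem.Int.floordiv n 10 = n / 10 :=
    PySem.Int.floordiv_eq_ediv_of_pos (by omega)
  rw [hfd]; omega

-- ===== VERDICT (by name: the statement is the Claim_ definition above) =====
theorem word_number_spec : Claim_equal_word_number := by
  intro a hdom
  have hl : ∀ c ∈ a.toList, pvDomChar c = true := by
    simpa [pvDomStr, List.all_eq_true, Dom_word_number] using hdom
  have hfold : a.toList.foldl stepA 0 = a.toList.foldl stepB 0 :=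
    foldl_step_eq a.toList hl 0
  have hA : word_number a
      = (if a.toList.foldl stepA 0 > 9 then sum_of_digit (a.toList.foldl stepA 0)
         else a.toList.foldl stepA 0) := rfl
  have hB : word_number_alt a
      = (if a.toList.foldl stepB 0 > 9 then digit_sum (a.toList.foldl stepB 0)
         else a.toList.foldl stepB 0) := rfl
  show word_number a = word_number_alt a
  rw [hA, hB, hfold]
  split_ifs with h
  · exact (sum_loop_eq_digit_sum _ 0).trans (by ring)
  · rfl
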